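-- pv_equiv track=rewrite | github.com/minjoon-98/Algorithm | 백준/Silver/27436. 벌집 2/벌집 2.py | find_minimum_rooms
-- ===== SOURCE A (Python) =====
-- def find_minimum_rooms(N):
--     # N이 1인 경우는 중앙의 1번 방이므로 바로 1을 반환
--     if N == 1:
--         return 1
--
--     # 이진 탐색 범위 초기화
--     left, right = 1, N
--
--     while left <= right:
--         # 중간값 계산
--         mid = (left + right) // 2
--
--         # mid 레벨의 최대 방 번호 계산
--         # max_room = [1]
--         # for i in range(1, mid+1):
--         #     max_room.append(max_room[i-1] * 6*i)
--         max_room = 1 + 3 * mid * (mid + 1)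
--         if N <= max_room:
--             # N이 max_room보다 작거나 같다면, 더 작은 범위 탐색
--             right = mid - 1
--         else:
--             # N이 max_room보다 크다면, 더 큰 범위 탐색
--             left = mid + 1
--
--     # left는 최종적으로 N이 속하는 레벨을 가리킴
--     # 1번 방을 포함하여 레벨을 계산하므로 1을 더함
--     return left + 1
-- ===== SOURCE B (Python) =====
-- def _isqrt(n):
--     # Newton's integer square root (floor), hand-rolled since no math import.
--     if n < 0:
--         raise ValueError("isqrt of negative number")
--     if n <= 1:
--         return n
--     x = n // 2
--     y = (x + n // x) // 2
--     while y < x: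
--         x = y
--         y = (x + n // x) // 2
--     return x
--
--
-- def find_minimum_rooms(N):
--     # Closed form: level L is the least L >= 0 with N <= 1 + 3*L*(L+1),
--     # i.e. the least L with (6L+3)^2 >= 12N-3; answer is L + 1.
--     s = _isqrt(12 * N - 3)
--     L = (s - 3) // 6
--     if 1 + 3 * L * (L + 1) < N:
--         L += 1
--     return L + 1
-- ===== Notes on version B (the rewrite author's own statement) =====
-- stated objective: alternative
-- what changed: A binary-searches the ring level; B computes it in closed form as the ceiling root of the quadratic 3L(L+1)+1 >= N via a hand-rolled Newton integer square root of 12N-3 (no math import available in the module), removing the search loop over levels.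
-- outside the precondition, e.g. on find_minimum_rooms(0): A returns 2, B raises ValueError; on find_minimum_rooms(-5): A returns 2, B raises ValueError
import Mathlib
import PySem

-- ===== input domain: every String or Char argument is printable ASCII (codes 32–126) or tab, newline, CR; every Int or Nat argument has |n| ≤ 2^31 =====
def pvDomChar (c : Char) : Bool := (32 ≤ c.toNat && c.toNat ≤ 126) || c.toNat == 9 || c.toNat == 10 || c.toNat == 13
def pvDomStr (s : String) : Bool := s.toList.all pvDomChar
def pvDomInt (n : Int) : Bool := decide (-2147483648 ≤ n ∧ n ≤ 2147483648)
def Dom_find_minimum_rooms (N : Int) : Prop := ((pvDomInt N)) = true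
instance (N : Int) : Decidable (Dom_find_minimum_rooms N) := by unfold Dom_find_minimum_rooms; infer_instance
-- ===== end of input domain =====

-- B replaces A's binary search over levels by a closed-form quadratic solution using a
-- hand-rolled Newton integer square root of 12N-3 (objective: alternative algorithm).


-- ===== PORT A =====
-- A's while-loop, as recursion on a fuel bound; each iteration shrinks [left, right],
-- so any fuel > right + 1 - left reproduces the Python loop exactly
def loopA : Nat → Int → Int → Int → Int
  | 0, _, left, _ => left
  | fuel + 1, N, left, right =>
    if left ≤ right then
      let mid := PySem.Int.floordiv (left + right) 2
      let max_room := 1 + 3 * mid * (mid + 1)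
      if N ≤ max_room then loopA fuel N left (mid - 1)
      else loopA fuel N (mid + 1) right
    else left

def find_minimum_rooms (N : Int) : Int :=
  if N = 1 then 1
  else loopA (N.toNat + 1) N 1 N + 1

-- ===== PORT B =====
-- the Newton while-loop of B's hand-written _isqrt (x = guess, y = next); the guess
-- strictly decreases each iteration, so any fuel > initial guess reproduces the loop
def isqrtIter : Nat → Nat → Nat → Nat
  | 0, _, guess => guess
  | fuel + 1, n, guess =>
    let next := (guess + n / guess) / 2
    if next < guess then isqrtIter fuel n next else guess

-- B's _isqrt; its Python raises ValueError for n < 0, which is unreachable under Pre_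
def pyIsqrt (n : Int) : Int :=
  if n ≤ 1 then n
  else (isqrtIter (n.toNat / 2 + 1) n.toNat (n.toNat / 2) : Int)

def find_minimum_rooms_alt (N : Int) : Int :=
  let s := pyIsqrt (12 * N - 3)
  let L := PySem.Int.floordiv (s - 3) 6
  let L' := if 1 + 3 * L * (L + 1) < N then L + 1 else L
  L' + 1

-- ===== PRECONDITION & SPEC =====
-- Pre_ excludes N ≤ 0 (no such beehive cell exists): there A returns 2 without its loop ever
-- running, an artefact of the search bounds, while B's isqrt of the negative 12N-3 raises ValueError.
def Pre_find_minimum_rooms (N : Int) : Prop := 1 ≤ N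
instance (N : Int) : Decidable (Pre_find_minimum_rooms N) := by unfold Pre_find_minimum_rooms; infer_instance

def pvWitness_find_minimum_rooms : Int := 7

def Spec_find_minimum_rooms (N : Int) (out : Int) : Prop := out = find_minimum_rooms_alt N
instance (N : Int) (out : Int) : Decidable (Spec_find_minimum_rooms N out) := by unfold Spec_find_minimum_rooms; infer_instance

-- ===== CLAIM (what is proved, stated in full; the proofs are below) =====
def Claim_equal_find_minimum_rooms : Prop := ∀ (N : Int), Dom_find_minimum_rooms N → Pre_find_minimum_rooms N → Spec_find_minimum_rooms N (find_minimum_rooms N)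

-- ===== LEMMAS AND PROOFS =====

-- number of cells within rings 0..L of the beehive
def capL (L : Int) : Int := 1 + 3 * L * (L + 1)

theorem capL_mono {l l' : Int} (h0 : 0 ≤ l) (h : l ≤ l') : capL l ≤ capL l' := by
  unfold capL; nlinarith

-- A's binary search returns the least level r ≥ 1 with N ≤ capL r, given the sentinel facts
theorem loopA_spec (N : Int) : ∀ fuel : Nat, ∀ left right : Int,
    (right + 1 - left).toNat < fuel → 1 ≤ left → left ≤ right + 1 →
    N ≤ capL (right + 1) → (left = 1 ∨ ¬ N ≤ capL (left - 1)) →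
    (1 ≤ loopA fuel N left right ∧ N ≤ capL (loopA fuel N left right) ∧
      (loopA fuel N left right = 1 ∨ ¬ N ≤ capL (loopA fuel N left right - 1))) := by
  intro fuel
  induction fuel with
  | zero => intro left right hf; omega
  | succ fuel ih =>
    intro left right hf h1 h2 h3 h4
    show (1 ≤ loopA (fuel + 1) N left right ∧ _)
    rw [loopA]
    by_cases h : left ≤ right
    · rw [if_pos h]
      have hb := PySem.Int.floordiv_two_mid_bounds (lo := left) (hi := right) h
      set mid := PySem.Int.floordiv (left + right) 2 with hmid
      by_cases hif : N ≤ 1 + 3 * mid * (mid + 1)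
      · rw [if_pos hif]
        apply ih left (mid - 1) (by omega) h1 (by omega)
        · have heq : mid - 1 + 1 = mid := by omega
          rw [heq]; exact hif
        · exact h4
      · rw [if_neg hif]
        apply ih (mid + 1) right (by omega) (by omega) (by omega) h3
        right
        have heq : mid + 1 - 1 = mid := by omega
        rw [heq]; exact hif
    · rw [if_neg h]
      have hl : left = right + 1 := by omega
      exact ⟨h1, by rw [hl]; exact h3, h4⟩

-- B's Newton loop is core's Nat.sqrt.iter
theorem isqrtIter_eq (n : Nat) : ∀ fuel g : Nat, g < fuel →
    isqrtIter fuel n g = Nat.sqrt.iter n g := by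
  intro fuel
  induction fuel with
  | zero => intro g hg; omega
  | succ fuel ih =>
    intro g hg
    rw [isqrtIter, Nat.sqrt.iter]
    by_cases h : (g + n / g) / 2 < g
    · rw [if_pos h, dif_pos h]
      exact ih _ (by omega)
    · rw [if_neg h, dif_neg h]

theorem pyIsqrt_correct (m : Int) (hm : 9 ≤ m) :
    0 ≤ pyIsqrt m ∧ pyIsqrt m * pyIsqrt m ≤ m ∧ m < (pyIsqrt m + 1) * (pyIsqrt m + 1) := by
  have hnle : ¬ m ≤ 1 := by omega
  unfold pyIsqrt
  rw [if_neg hnle, isqrtIter_eq m.toNat (m.toNat / 2 + 1) (m.toNat / 2) (by omega)]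
  set n := m.toNat with hn
  have hmn : (n : Int) = m := by omega
  have h1 : Nat.sqrt.iter n (n/2) * Nat.sqrt.iter n (n/2) ≤ n := Nat.sqrt.iter_sq_le n (n/2)
  have h2 : n < (Nat.sqrt.iter n (n/2) + 1) * (Nat.sqrt.iter n (n/2) + 1) := by
    apply Nat.sqrt.lt_iter_succ_sq
    have hq : 1 ≤ n / 2 := by omega
    have hle : n ≤ 2 * (n / 2) + 1 := by omega
    nlinarith
  refine ⟨by positivity, ?_, ?_⟩
  · exact_mod_cast hmn ▸ (by exact_mod_cast h1 : ((Nat.sqrt.iter n (n/2) * Nat.sqrt.iter n (n/2) : Nat) : Int) ≤ (n : Int))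
  · calc m = (n : Int) := hmn.symm
      _ < ((Nat.sqrt.iter n (n/2) + 1) * (Nat.sqrt.iter n (n/2) + 1) : Nat) := by exact_mod_cast h2
      _ = _ := by push_cast; ring

-- B's closed form also returns (least level) + 1, for N ≥ 2
theorem alt_spec (N : Int) (hN : 2 ≤ N) :
    (2 ≤ find_minimum_rooms_alt N ∧ N ≤ capL (find_minimum_rooms_alt N - 1) ∧
      ¬ N ≤ capL (find_minimum_rooms_alt N - 2)) := by
  have hm : (9:Int) ≤ 12 * N - 3 := by omega
  obtain ⟨hs0, hsle, hslt⟩ := pyIsqrt_correct (12 * N - 3) hm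
  set s := pyIsqrt (12 * N - 3) with hs
  set L := PySem.Int.floordiv (s - 3) 6 with hL
  have hb1 : L * 6 ≤ s - 3 := (PySem.Int.le_floordiv_iff_mul_le (by norm_num)).mp (le_refl L)
  have hb2 : s - 3 < (L + 1) * 6 := (PySem.Int.floordiv_lt_iff_lt_mul (by norm_num)).mp (by omega)
  have hs4 : 4 ≤ s := by nlinarith
  have hL0 : 0 ≤ L := by omega
  have hval : find_minimum_rooms_alt N = (if 1 + 3 * L * (L + 1) < N then L + 1 else L) + 1 := by
    simp only [find_minimum_rooms_alt, ← hs, ← hL]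
  by_cases hc : 1 + 3 * L * (L + 1) < N
  · rw [hval, if_pos hc]
    refine ⟨by omega, ?_, ?_⟩
    · show N ≤ capL (L + 1 + 1 - 1)
      have h' : L + 1 + 1 - 1 = L + 1 := by ring
      rw [h']; unfold capL
      nlinarith
    · show ¬ N ≤ capL (L + 1 + 1 - 2)
      have h' : L + 1 + 1 - 2 = L := by ring
      rw [h']; unfold capL; omega
  · rw [hval, if_neg hc]
    push Not at hc
    have hL1 : 1 ≤ L := by nlinarith
    refine ⟨by omega, ?_, ?_⟩
    · show N ≤ capL (L + 1 - 1)
      have h' : L + 1 - 1 = L := by ring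
      rw [h']; unfold capL; omega
    · show ¬ N ≤ capL (L + 1 - 2)
      have h' : L + 1 - 2 = L - 1 := by ring
      rw [h']; unfold capL
      have h9 : 9 ≤ s := by omega
      nlinarith

theorem alt_one : find_minimum_rooms_alt 1 = 1 := by
  obtain ⟨hs0, hsle, hslt⟩ := pyIsqrt_correct 9 (by norm_num)
  have h3 : pyIsqrt 9 = 3 := by nlinarith
  simp only [find_minimum_rooms_alt]
  norm_num [h3]

theorem level_uniq (N a b : Int) (ha1 : 1 ≤ a) (haP : N ≤ capL a) (haM : ¬ N ≤ capL (a - 1))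
    (hb1 : 1 ≤ b) (hbP : N ≤ capL b) (hbM : ¬ N ≤ capL (b - 1)) : a = b := by
  rcases lt_trichotomy a b with h | h | h
  · exact absurd (le_trans haP (capL_mono (by omega) (by omega : a ≤ b - 1))) hbM
  · exact h
  · exact absurd (le_trans hbP (capL_mono (by omega) (by omega : b ≤ a - 1))) haM

-- ===== VERDICT (by name: the statement is the Claim_ definition above) =====
theorem find_minimum_rooms_spec : Claim_equal_find_minimum_rooms := by
  intro N _ hPre
  unfold Spec_find_minimum_rooms
  by_cases h1 : N = 1
  · subst h1
    rw [alt_one]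
    simp [find_minimum_rooms]
  · have hN : 2 ≤ N := by unfold Pre_find_minimum_rooms at hPre; omega
    have hA := loopA_spec N (N.toNat + 1) 1 N (by omega) (by omega) (by omega)
      (by unfold capL; nlinarith) (Or.inl rfl)
    have hB := alt_spec N hN
    have hAM : ¬ N ≤ capL (loopA (N.toNat + 1) N 1 N - 1) := by
      rcases hA.2.2 with h | h
      · rw [h]; unfold capL; omega
      · exact h
    have huniq := level_uniq N (loopA (N.toNat + 1) N 1 N) (find_minimum_rooms_alt N - 1)
      hA.1 hA.2.1 hAM (by omega) hB.2.1
      (by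
        have h' : find_minimum_rooms_alt N - 1 - 1 = find_minimum_rooms_alt N - 2 := by ring
        rw [h']; exact hB.2.2)
    unfold find_minimum_rooms
    rw [if_neg h1]
    omega
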